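-- pv_equiv track=rewrite | github.com/popobg/leetcode | hard/substrings_concatenation/substrings_concatenation.py | all_substrings
-- ===== SOURCE A (Python) =====
-- def all_substrings(substr: str, words: list[int], dic: dict[str:int]) -> bool:
--     """return True if all the words and only them are in the substring
--     return False otherwise"""
--     # the dict with the words of the substring and their occurences
--     dic_substr = {}
--
--     for i in range(0, len(substr), len(words[0])):
--         word = substr[i:i + len(words[0])]
--
--         dic_substr[word] = dic_substr.get(word, 0) + 1
--
--     # are the dic with words and the dic of the substring the same?
--     if dic == dic_substr:
--         return True
--
--     return False
-- ===== SOURCE B (Python) =====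
-- def all_substrings(substr: str, words: list[int], dic: dict) -> bool:
--     """return True if all the words and only them are in the substring
--     return False otherwise"""
--     step = len(words[0])
--     remaining = dict(dic)
--     for i in range(0, len(substr), step):
--         chunk = substr[i:i + step]
--         c = remaining.get(chunk)
--         if not c:
--             # chunk is not a required word, or its quota is already used up
--             return False
--         remaining[chunk] = c - 1
--     return all(v == 0 for v in remaining.values())
-- ===== Notes on version B (the rewrite author's own statement) =====
-- stated objective: alternative
-- what changed: B decrements a mutable copy of the target dict chunk by chunk with an early exit on an unknown or exhausted chunk and finally checks all counts reached zero, instead of A's building a full chunk histogram and comparing it to the dict by equality.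
-- outside the precondition, e.g. on all_substrings('', ['ab'], {'x': 0}): A returns False, B returns True
import Mathlib
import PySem

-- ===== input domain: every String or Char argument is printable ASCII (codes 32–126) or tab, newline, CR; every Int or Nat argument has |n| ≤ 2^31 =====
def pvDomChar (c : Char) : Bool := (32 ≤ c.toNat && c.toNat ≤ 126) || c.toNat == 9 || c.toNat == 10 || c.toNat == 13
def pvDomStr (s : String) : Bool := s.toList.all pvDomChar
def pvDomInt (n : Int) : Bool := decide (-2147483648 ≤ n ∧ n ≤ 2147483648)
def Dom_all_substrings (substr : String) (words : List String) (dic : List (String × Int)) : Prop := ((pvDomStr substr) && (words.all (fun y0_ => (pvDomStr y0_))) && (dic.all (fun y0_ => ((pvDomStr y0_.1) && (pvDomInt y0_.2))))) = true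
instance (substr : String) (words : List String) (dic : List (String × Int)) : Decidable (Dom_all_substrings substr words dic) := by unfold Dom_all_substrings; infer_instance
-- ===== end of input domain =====

-- B replaces A's chunk-histogram + dict-equality by a countdown over a copy of the target dict with an early exit (alternative decomposition, same cost).


-- ===== PORT A =====
-- Python's `dic == dic_substr` on dicts ignores insertion order: equal sizes and every item of d1 found in d2.
def pyDictEq (d1 d2 : PySem.Dict String Int) : Bool :=
  (d1.size == d2.size) && d1.items.all (fun p => d2.get? p.1 == some p.2)

def all_substrings (substr : String) (words : List String) (dic : List (String × Int)) : Bool :=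
  let L : Int := PySem.Str.len (words.headD "")   -- words[0]; Pre_ requires words ≠ []
  let dic_substr : PySem.Dict String Int :=
    (PySem.List.pyRange 0 (PySem.Str.len substr) L).foldl
      (fun d i =>
        let word := String.mk (PySem.List.slice substr.toList (some i) (some (i + L)))
        d.insert word (d.getD word 0 + 1))
      PySem.Dict.empty
  if pyDictEq (PySem.Dict.ofList dic) dic_substr then true else false

-- ===== PORT B =====
-- the loop of Source B: consume chunks, decrementing the remaining quota, early False on a missing/exhausted chunk
def altGo (chunks : List String) (rem : PySem.Dict String Int) : Bool :=
  match chunks with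
  | [] => rem.values.all (fun v => v == 0)
  | c :: cs =>
    match rem.get? c with
    | none => false                                  -- `not c` with c = None
    | some v => if v == 0 then false else altGo cs (rem.insert c (v - 1))

def all_substrings_alt (substr : String) (words : List String) (dic : List (String × Int)) : Bool :=
  let step : Int := PySem.Str.len (words.headD "")
  let chunks := (PySem.List.pyRange 0 (PySem.Str.len substr) step).map
    (fun i => String.mk (PySem.List.slice substr.toList (some i) (some (i + step))))
  altGo chunks (PySem.Dict.ofList dic)

-- ===== PRECONDITION & SPEC =====
-- Pre_ excludes: words = [] (A raises IndexError) and words[0] = "" (A raises ValueError: range() arg 3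
-- must not be zero); and dicts containing a zero count, a defensible corner on which A's dict-equality
-- reading (a chunk histogram never stores the value 0, so A answers False) and B's multiset-countdown
-- reading (a word required 0 times and absent is satisfied) legitimately disagree.
def Pre_all_substrings (substr : String) (words : List String) (dic : List (String × Int)) : Prop :=
  words ≠ [] ∧ (words.headD "") ≠ "" ∧ ∀ p ∈ (PySem.Dict.ofList dic).items, p.2 ≠ 0
instance (substr : String) (words : List String) (dic : List (String × Int)) : Decidable (Pre_all_substrings substr words dic) := by unfold Pre_all_substrings; infer_instance

def pvWitness_all_substrings : String × List String × (List (String × Int)) :=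
  ("abcdab", ["ab"], [("ab", 2), ("cd", 1)])

def Spec_all_substrings (substr : String) (words : List String) (dic : List (String × Int)) (out : Bool) : Prop := out = all_substrings_alt substr words dic
instance (substr : String) (words : List String) (dic : List (String × Int)) (out : Bool) : Decidable (Spec_all_substrings substr words dic out) := by unfold Spec_all_substrings; infer_instance

-- ===== CLAIM (what is proved, stated in full; the proofs are below) =====
def Claim_equal_all_substrings : Prop := ∀ (substr : String) (words : List String) (dic : List (String × Int)), Dom_all_substrings substr words dic → Pre_all_substrings substr words dic → Spec_all_substrings substr words dic (all_substrings substr words dic)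

-- ===== LEMMAS AND PROOFS =====

-- common characterisation of "the chunk list realises exactly the target dict": every chunk is a key of
-- the target, and every target entry's count is exactly the number of occurrences of its key in the chunks
def Matches (ws : List String) (d : PySem.Dict String Int) : Prop :=
  (∀ c ∈ ws, d.contains c = true) ∧ (∀ p ∈ d.items, p.2 = (ws.count p.1 : Int))

theorem get?_counter (ws : List String) (k : String) :
    (PySem.Dict.counter ws).get? k = if k ∈ ws then some ((ws.count k : Int)) else none := by
  by_cases h : k ∈ ws
  · simp only [h, if_true]
    have hk : (k, (ws.count k : Int)) ∈ (PySem.Dict.counter ws).items := by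
      rw [PySem.Dict.items_counter]
      exact List.mem_map.2 ⟨k, (PySem.Set.mem_ofList _ _).2 h, rfl⟩
    exact PySem.Dict.get?_of_mem_items _ hk (PySem.Dict.nodup_keys_counter ws)
  · simp only [h, if_false]
    rw [PySem.Dict.get?_eq_none_iff_not_mem_keys, PySem.Dict.keys_counter]
    exact fun hm => h ((PySem.Set.mem_ofList _ _).1 hm)

theorem mem_keys_iff_mem_items_fst (d : PySem.Dict String Int) (k : String) :
    k ∈ d.keys ↔ ∃ p ∈ d.items, p.1 = k := by
  simp [PySem.Dict.keys, List.mem_map]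

-- A's side: histogram-vs-target dict equality is exactly `Matches` (given no zero counts in the target)
theorem a_iff (ws : List String) (d : PySem.Dict String Int)
    (hnd : d.keys.Nodup) (hnz : ∀ p ∈ d.items, p.2 ≠ 0) :
    pyDictEq d (PySem.Dict.counter ws) = true ↔ Matches ws d := by
  have hlenk : d.keys.length = d.size := by simp [PySem.Dict.keys, PySem.Dict.size]
  have hlenc : (PySem.Dict.counter ws).keys.length = (PySem.Dict.counter ws).size := by
    simp [PySem.Dict.keys, PySem.Dict.size]
  unfold pyDictEq Matches
  rw [Bool.and_eq_true, List.all_eq_true, beq_iff_eq]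
  constructor
  · rintro ⟨hsz, hall⟩
    have hitems : ∀ p ∈ d.items, p.2 = (ws.count p.1 : Int) ∧ p.1 ∈ ws := by
      intro p hp
      have h := hall p hp
      rw [beq_iff_eq, get?_counter] at h
      by_cases hm : p.1 ∈ ws
      · simp only [hm, if_true, Option.some.injEq] at h
        exact ⟨h.symm, hm⟩
      · simp [hm] at h
    refine ⟨?_, fun p hp => (hitems p hp).1⟩
    intro c hc
    -- key sets coincide: subset + equal cardinality
    have hsub : d.keys.toFinset ⊆ (PySem.Dict.counter ws).keys.toFinset := by
      intro k hk
      rw [List.mem_toFinset] at hk ⊢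
      obtain ⟨p, hp, hpk⟩ := (mem_keys_iff_mem_items_fst d k).1 hk
      rw [PySem.Dict.keys_counter]
      exact (PySem.Set.mem_ofList _ _).2 (hpk ▸ (hitems p hp).2)
    have hcard : ((PySem.Dict.counter ws).keys.toFinset).card ≤ (d.keys.toFinset).card := by
      rw [List.toFinset_card_of_nodup hnd,
          List.toFinset_card_of_nodup (PySem.Dict.nodup_keys_counter ws), hlenk, hlenc, hsz]
    have heq := Finset.eq_of_subset_of_card_le hsub hcard
    rw [PySem.Dict.contains_iff_mem_keys, ← List.mem_toFinset, heq, List.mem_toFinset,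
        PySem.Dict.keys_counter, PySem.Set.mem_ofList]
    exact hc
  · rintro ⟨hcont, hcount⟩
    have hmem : ∀ p ∈ d.items, p.1 ∈ ws := by
      intro p hp
      have h0 := hnz p hp
      rw [hcount p hp] at h0
      have : ws.count p.1 ≠ 0 := by exact_mod_cast h0
      exact List.count_pos_iff.1 (Nat.pos_of_ne_zero this)
    constructor
    · -- equal sizes via equal key sets
      have hfin : d.keys.toFinset = (PySem.Dict.counter ws).keys.toFinset := by
        apply Finset.Subset.antisymm
        · intro k hk
          rw [List.mem_toFinset] at hk ⊢
          obtain ⟨p, hp, hpk⟩ := (mem_keys_iff_mem_items_fst d k).1 hk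
          rw [PySem.Dict.keys_counter]
          exact (PySem.Set.mem_ofList _ _).2 (hpk ▸ hmem p hp)
        · intro k hk
          rw [List.mem_toFinset] at hk ⊢
          rw [PySem.Dict.keys_counter, PySem.Set.mem_ofList] at hk
          exact (PySem.Dict.contains_iff_mem_keys d k).1 (hcont k hk)
      have := congrArg Finset.card hfin
      rw [List.toFinset_card_of_nodup hnd,
          List.toFinset_card_of_nodup (PySem.Dict.nodup_keys_counter ws), hlenk, hlenc] at this
      exact this
    · intro p hp
      rw [beq_iff_eq, get?_counter]
      simp only [hmem p hp, if_true, Option.some.injEq]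
      exact (hcount p hp).symm
-- B's side: the countdown loop succeeds exactly on `Matches` (no zero-count hypothesis needed here)
theorem b_iff (ws : List String) (d : PySem.Dict String Int) (hnd : d.keys.Nodup) :
    altGo ws d = true ↔ Matches ws d := by
  induction ws generalizing d with
  | nil =>
    show (d.values.all (fun v => v == 0)) = true ↔ _
    unfold Matches
    rw [List.all_eq_true]
    simp only [PySem.Dict.values, List.mem_map, List.not_mem_nil, false_implies, implies_true,
      true_and, List.count_nil, Nat.cast_zero, beq_iff_eq]
    constructor
    · rintro h p hp; exact h p.2 ⟨p, hp, rfl⟩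
    · rintro h v ⟨p, hp, rfl⟩; exact h p hp
  | cons c cs ih =>
    unfold altGo
    cases hg : d.get? c with
    | none =>
      simp only [Bool.false_eq_true, false_iff]
      intro hm
      have := hm.1 c (List.mem_cons_self)
      rw [PySem.Dict.contains_eq_isSome_get?, hg] at this
      simp at this
    | some v =>
      have hcv : (c, v) ∈ d.items := PySem.Dict.mem_items_of_get?_eq_some d hg
      show (if (v == 0) = true then false else altGo cs (d.insert c (v - 1))) = true ↔ _
      by_cases hv : v = 0
      · simp only [hv, beq_self_eq_true, if_true, Bool.false_eq_true, false_iff]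
        intro hm
        have := hm.2 (c, 0) (hv ▸ hcv)
        simp at this
        omega
      · rw [if_neg (by simpa using hv)]
        rw [ih _ (PySem.Dict.nodup_keys_insert d c (v - 1) hnd)]
        unfold Matches
        constructor
        · rintro ⟨hc1, hi1⟩
          constructor
          · intro x hx
            rcases List.mem_cons.1 hx with rfl | hx'
            · rw [PySem.Dict.contains_eq_isSome_get?, hg]; rfl
            · have := hc1 x hx'
              rw [PySem.Dict.contains_insert] at this
              rcases Bool.or_eq_true_iff.1 this with h | h
              · rw [PySem.Dict.contains_iff_mem_keys]
                have : x = c := by simpa using h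
                subst this
                exact (mem_keys_iff_mem_items_fst d x).2 ⟨(x, v), hcv, rfl⟩
              · exact h
          · intro p hp
            by_cases hpc : p.1 = c
            · have hpv : p.2 = v := by
                have := PySem.Dict.get?_of_mem_items d (k := p.1) (v := p.2)
                  (by simpa using hp) hnd
                rw [hpc, hg] at this
                simpa using this.symm
              have h1 := hi1 (c, v - 1) (PySem.Dict.mem_items_insert_self d c (v - 1))
              simp only at h1
              rw [hpv, hpc]
              rw [List.count_cons]
              simp only [beq_self_eq_true, if_true]
              push_cast
              omega
            · have h1 := hi1 p ((PySem.Dict.mem_items_insert d c (v - 1) p).2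
                (Or.inr ⟨hp, hpc⟩))
              rw [h1, List.count_cons]
              have : (c == p.1) = false := by simp [Ne.symm hpc]
              simp [this]
        · rintro ⟨hc1, hi1⟩
          constructor
          · intro x hx
            rw [PySem.Dict.contains_insert]
            by_cases hxc : x = c
            · simp [hxc]
            · have hxc' : (x == c) = false := by simpa using hxc
              rw [hxc', Bool.false_or]
              exact hc1 x (List.mem_cons_of_mem _ hx)
          · intro p hp
            rcases (PySem.Dict.mem_items_insert d c (v - 1) p).1 hp with rfl | ⟨hp', hpc⟩
            · have h1 := hi1 (c, v) hcv
              simp only at h1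
              rw [List.count_cons] at h1
              simp only [beq_self_eq_true, if_true] at h1
              push_cast at h1 ⊢
              omega
            · have h1 := hi1 p hp'
              rw [h1, List.count_cons]
              have : (c == p.1) = false := by simp [Ne.symm hpc]
              simp [this]

-- ===== VERDICT (by name: the statement is the Claim_ definition above) =====
theorem all_substrings_spec : Claim_equal_all_substrings := by
  intro substr words dic _ hpre
  obtain ⟨-, -, hnz⟩ := hpre
  unfold Spec_all_substrings all_substrings all_substrings_alt
  simp only []
  set L : Int := PySem.Str.len (words.headD "") with hL
  set g : Int → String :=
    fun i => String.mk (PySem.List.slice substr.toList (some i) (some (i + L))) with hg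
  set idx := PySem.List.pyRange 0 (PySem.Str.len substr) L with hidx
  have hfold :
      idx.foldl (fun d i => d.insert (g i) (d.getD (g i) 0 + 1)) PySem.Dict.empty
        = PySem.Dict.counter (idx.map g) := by
    rw [← PySem.Dict.foldl_insert_getD_add_one_eq_counter, List.foldl_map]
  have hnd := PySem.Dict.nodup_keys_ofList dic
  have key : pyDictEq (PySem.Dict.ofList dic) (PySem.Dict.counter (idx.map g))
      = altGo (idx.map g) (PySem.Dict.ofList dic) := by
    rw [Bool.eq_iff_iff,
        a_iff (idx.map g) (PySem.Dict.ofList dic) hnd hnz,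
        b_iff (idx.map g) (PySem.Dict.ofList dic) hnd]
  rw [hfold, key]
  cases altGo (idx.map g) (PySem.Dict.ofList dic) <;> simp
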